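-- pv_equiv track=rewrite | github.com/Byongho96/algorithm_practice | Baekjoon/1715_카드_정렬하기.py | solution
-- ===== SOURCE A (Python) =====
-- import heapq
-- from typing import List
--
-- def solution(N:int, cards: List[int]):
--     # make heap
--     heapq.heapify(cards)
--
--     # union the smallest cards recursively
--     cnt = 0
--     while cards:
--         if len(cards) < 2:
--             return cnt
--
--         new_cnt = heapq.heappop(cards) + heapq.heappop(cards)
--         cnt += new_cnt
--
--         heapq.heappush(cards, new_cnt)
-- ===== SOURCE B (Python) =====
-- from typing import List
--
-- def solution(N: int, cards: List[int]):
--     if not cards: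
--         return None
--     xs = sorted(cards)
--     cnt = 0
--     while len(xs) >= 2:
--         s = xs[0] + xs[1]
--         cnt += s
--         del xs[:2]
--         # binary search: first position whose element is >= s
--         lo, hi = 0, len(xs)
--         while lo < hi:
--             mid = (lo + hi) // 2
--             if xs[mid] < s:
--                 lo = mid + 1
--             else:
--                 hi = mid
--         xs.insert(lo, s)
--     return cnt
-- ===== Notes on version B (the rewrite author's own statement) =====
-- stated objective: alternative
-- what changed: Replaces the heap (heapify + heappop/heappush each step) by sorting the cards once and then repeatedly merging the two front elements of a sorted working list, re-inserting the sum at the position a hand-written binary search finds; trades the heap's O(log n) updates for flat-list insertion, so it is not faster on large inputs.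
-- outside the precondition, e.g. on solution(0, []): A returns None, B returns None
import Mathlib
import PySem

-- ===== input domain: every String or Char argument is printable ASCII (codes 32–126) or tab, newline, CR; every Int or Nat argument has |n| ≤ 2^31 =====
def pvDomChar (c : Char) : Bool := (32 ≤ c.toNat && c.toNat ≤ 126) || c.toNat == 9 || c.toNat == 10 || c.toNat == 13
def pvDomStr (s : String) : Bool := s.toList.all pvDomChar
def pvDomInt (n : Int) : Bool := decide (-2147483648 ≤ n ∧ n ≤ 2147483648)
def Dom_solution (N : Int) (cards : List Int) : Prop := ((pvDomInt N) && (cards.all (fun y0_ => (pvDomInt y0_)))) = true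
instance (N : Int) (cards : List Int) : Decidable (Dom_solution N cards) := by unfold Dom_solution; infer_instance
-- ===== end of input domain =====

-- B sorts once and merges on a sorted list instead of using a binary heap (idiomatic
-- alternative, not claimed faster). Equivalence is about the RETURN value only: Python A
-- mutates `cards` in place (it ends as the heap's final state), B leaves it untouched.

-- ===== PORT A =====
-- heapq calls are ported by the library's contract on a min-priority queue (exact on the
-- values exchanged): heappop returns the smallest element and removes one occurrence of it,
-- heappush adds the element, heapify only rearranges in place (identity on the multiset).
def heappopA (heap : List Int) : Int × List Int :=
  match heap.min? with
  | some m => (m, heap.erase m)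
  | none => (0, [])  -- unreachable: Python heappop on an empty heap raises

-- the `while cards:` loop of A; each iteration removes two elements and pushes one back,
-- so it runs at most `cards.length` times and is transcribed as structural recursion on that bound
def solutionLoopA : Nat → Int → List Int → Int
  | 0, cnt, _ => cnt
  | fuel + 1, cnt, cards =>
    if cards.length < 2 then cnt  -- covers both `while cards:` exit and `len(cards) < 2`
    else
      let p1 := heappopA cards
      let p2 := heappopA p1.2
      let newCnt := p1.1 + p2.1
      solutionLoopA fuel (cnt + newCnt) (p2.2 ++ [newCnt])  -- heappush

def solution (N : Int) (cards : List Int) : Int :=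
  solutionLoopA cards.length 0 cards  -- heapify: in-place rearrangement, identity on the multiset

-- ===== PORT B =====
-- the inner `while lo < hi` binary search of B: first position whose element is >= s;
-- it strictly shrinks hi - lo, so it is transcribed as structural recursion on that bound
-- (xs[mid] is ported with getD: mid is always in range since lo < hi <= len xs)
def bisectGo (xs : List Int) (s : Int) : Nat → Nat → Nat → Nat
  | 0, lo, _ => lo
  | fuel + 1, lo, hi =>
    if lo < hi then
      let mid := (lo + hi) / 2
      if xs.getD mid 0 < s then bisectGo xs s fuel (mid + 1) hi else bisectGo xs s fuel lo mid
    else lo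

def bisectLeftB (xs : List Int) (s : Int) (lo hi : Nat) : Nat := bisectGo xs s (hi - lo) lo hi

-- the `while len(xs) >= 2` loop of B; each iteration shortens xs by one,
-- so it runs at most `xs.length` times and is transcribed as structural recursion on that bound
def solutionLoopB : Nat → Int → List Int → Int
  | 0, cnt, _ => cnt
  | fuel + 1, cnt, xs =>
    match xs with
    | a :: b :: rest =>
        let s := a + b
        solutionLoopB fuel (cnt + s) (rest.insertIdx (bisectLeftB rest s 0 rest.length) s)
    | _ => cnt

def solution_alt (N : Int) (cards : List Int) : Int :=
  solutionLoopB (PySem.List.sorted cards (fun x => x) false).length 0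
    (PySem.List.sorted cards (fun x => x) false)

-- ===== PRECONDITION & SPEC =====
-- Pre_ excludes the empty list, on which Python A returns None (not an int); B returns None there too.
def Pre_solution (N : Int) (cards : List Int) : Prop := cards ≠ []
instance (N : Int) (cards : List Int) : Decidable (Pre_solution N cards) := by unfold Pre_solution; infer_instance
def pvWitness_solution : Int × List Int := (3, [10, 20, 40])

def Spec_solution (N : Int) (cards : List Int) (out : Int) : Prop := out = solution_alt N cards
instance (N : Int) (cards : List Int) (out : Int) : Decidable (Spec_solution N cards out) := by unfold Spec_solution; infer_instance

-- ===== CLAIM (what is proved, stated in full; the proofs are below) =====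
def Claim_equal_solution : Prop := ∀ (N : Int) (cards : List Int), Dom_solution N cards → Pre_solution N cards → Spec_solution N cards (solution N cards)

-- ===== LEMMAS AND PROOFS =====

-- the head of a sorted permutation is the min? of the list
lemma min?_of_perm_sorted (l : List Int) (a : Int) (t : List Int)
    (hp : (a :: t).Perm l) (hs : (a :: t).Pairwise (· ≤ ·)) : l.min? = some a := by
  rw [List.min?_eq_some_iff]
  constructor
  · exact hp.mem_iff.mp (by simp)
  · intro x hx
    have hx' : x ∈ a :: t := hp.mem_iff.mpr hx
    rcases List.mem_cons.mp hx' with rfl | hx2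
    · exact le_refl _
    · exact (List.pairwise_cons.mp hs).1 x hx2

-- the binary search result stays within [lo, hi]
lemma bisectGo_le (xs : List Int) (s : Int) : ∀ (n lo hi : Nat), lo ≤ hi → bisectGo xs s n lo hi ≤ hi := by
  intro n
  induction n with
  | zero =>
    intro lo hi h2
    exact h2
  | succ n ih =>
    intro lo hi h2
    rw [bisectGo]
    dsimp only
    split
    · split
      · exact ih _ _ (by omega)
      · exact le_trans (ih _ _ (by omega)) (by omega)
    · exact h2

lemma bisectLeftB_le (xs : List Int) (s : Int) (lo hi : Nat) (h : lo ≤ hi) : bisectLeftB xs s lo hi ≤ hi :=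
  bisectGo_le xs s (hi - lo) lo hi h

-- the binary search returns a position k with everything before it < s and everything from it on ≥ s
lemma bisectGo_spec (xs : List Int) (s : Int) (hsort : xs.Pairwise (· ≤ ·)) :
    ∀ (n lo hi : Nat), hi - lo ≤ n → lo ≤ hi → hi ≤ xs.length →
    (∀ j (hj : j < xs.length), j < lo → xs[j] < s) →
    (∀ j (hj : j < xs.length), hi ≤ j → s ≤ xs[j]) →
    (∀ j (hj : j < xs.length), j < bisectGo xs s n lo hi → xs[j] < s) ∧
    (∀ j (hj : j < xs.length), bisectGo xs s n lo hi ≤ j → s ≤ xs[j]) := by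
  have mono : ∀ (i j : Nat) (hi_ : i < xs.length) (hj : j < xs.length), i ≤ j → xs[i] ≤ xs[j] := by
    intro i j hi_ hj hij
    rcases Nat.lt_or_ge i j with h | h
    · exact (List.pairwise_iff_getElem.mp hsort) i j hi_ hj h
    · have : i = j := by omega
      subst this; exact le_refl _
  intro n
  induction n with
  | zero =>
    intro lo hi h1 h2 h3 hlo hhi
    refine ⟨fun j hj hji => hlo j hj hji, fun j hj hji => hhi j hj ?_⟩
    have h4 : lo ≤ j := hji
    omega
  | succ n ih =>
    intro lo hi h1 h2 h3 hlo hhi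
    rw [bisectGo]
    dsimp only
    split
    · rename_i hlt
      have hmid : (lo + hi) / 2 < xs.length := by omega
      rw [List.getD_eq_getElem xs 0 hmid]
      split
      · rename_i hc
        refine ih ((lo + hi) / 2 + 1) hi (by omega) (by omega) h3 ?_ hhi
        intro j hj hji
        exact lt_of_le_of_lt (mono j ((lo + hi) / 2) hj hmid (by omega)) hc
      · rename_i hc
        refine ih lo ((lo + hi) / 2) (by omega) (by omega) (by omega) hlo ?_
        intro j hj hji
        exact le_trans (not_lt.mp hc) (mono ((lo + hi) / 2) j hmid hj hji)
    · exact ⟨hlo, fun j hj hji => hhi j hj (by omega)⟩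

lemma bisectLeftB_spec (xs : List Int) (s : Int) (hsort : xs.Pairwise (· ≤ ·)) :
    (∀ j (hj : j < xs.length), j < bisectLeftB xs s 0 xs.length → xs[j] < s) ∧
    (∀ j (hj : j < xs.length), bisectLeftB xs s 0 xs.length ≤ j → s ≤ xs[j]) := by
  unfold bisectLeftB
  exact bisectGo_spec xs s hsort (xs.length - 0) 0 xs.length (le_refl _) (Nat.zero_le _) (le_refl _)
    (fun j hj hji => absurd hji (by omega)) (fun j hj hji => absurd hji (by omega))

-- inserting at the position the binary search found is exactly an ordered insertion
lemma insertIdx_eq_orderedInsert : ∀ (xs : List Int) (v : Int) (k : Nat),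
    k ≤ xs.length →
    (∀ j (hj : j < xs.length), j < k → xs[j] < v) →
    (∀ j (hj : j < xs.length), k ≤ j → v ≤ xs[j]) →
    xs.insertIdx k v = List.orderedInsert (· ≤ ·) v xs := by
  intro xs
  induction xs with
  | nil =>
    intro v k hk _ _
    have : k = 0 := by simpa using hk
    subst this
    simp [List.orderedInsert]
  | cons x t ih =>
    intro v k hk h1 h2
    cases k with
    | zero =>
      have hvx : v ≤ x := h2 0 (by simp) (by omega)
      simp [List.orderedInsert, hvx]
    | succ k =>
      have hx : x < v := h1 0 (by simp) (by omega)
      simp only [List.insertIdx_succ_cons, List.orderedInsert, if_neg (not_le.mpr hx)]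
      congr 1
      refine ih v k (by simpa using hk) ?_ ?_
      · intro j hj hjk
        simpa using h1 (j + 1) (by simpa using Nat.succ_lt_succ hj) (by omega)
      · intro j hj hjk
        simpa using h2 (j + 1) (by simpa using Nat.succ_lt_succ hj) (by omega)

-- core invariant: A's loop on any permutation of a sorted list equals B's loop
lemma loop_eq : ∀ (n : Nat) (cnt : Int) (l xs : List Int), l.length = n →
    xs.Perm l → xs.Pairwise (· ≤ ·) → solutionLoopA n cnt l = solutionLoopB n cnt xs := by
  intro n
  induction n using Nat.strong_induction_on with
  | _ n ih =>
    intro cnt l xs hlen hp hs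
    match xs, hs with
    | [], _ =>
      have hl0 : l = [] := List.Perm.nil_eq hp |>.symm
      subst hl0
      have hn : n = 0 := by simpa using hlen.symm
      subst hn
      rfl
    | [a], _ =>
      have h1 : l.length = 1 := by rw [← hp.length_eq]; rfl
      have hn : n = 1 := by omega
      subst hn
      rw [solutionLoopA, solutionLoopB]
      simp [h1]
      intro a1 b rest h
      simp at h
    | a :: b :: rest, hs =>
      have hlen2 : l.length = rest.length + 2 := by rw [← hp.length_eq]; simp
      -- first pop
      have hmin1 : l.min? = some a := min?_of_perm_sorted l a (b :: rest) hp hs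
      have hmem1 : a ∈ l := List.min?_mem hmin1
      have hp1 : (b :: rest).Perm (l.erase a) := by
        have := hp.erase a
        simpa using this
      have hs1 : (b :: rest).Pairwise (· ≤ ·) := (List.pairwise_cons.mp hs).2
      -- second pop
      have hmin2 : (l.erase a).min? = some b := min?_of_perm_sorted _ b rest hp1 hs1
      have hmem2 : b ∈ l.erase a := List.min?_mem hmin2
      have hp2 : rest.Perm ((l.erase a).erase b) := by
        have := hp1.erase b
        simpa using this
      obtain ⟨m, hm⟩ : ∃ m, n = m + 1 := ⟨rest.length + 1, by omega⟩
      subst hm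
      -- step A
      rw [solutionLoopA]
      have hnl : ¬ l.length < 2 := by omega
      simp only [hnl, heappopA, hmin1, hmin2]
      -- step B: the bisect-insert step equals an ordered insertion into the sorted tail
      rw [solutionLoopB]
      have hbsle : bisectLeftB rest (a + b) 0 rest.length ≤ rest.length :=
        bisectLeftB_le rest (a + b) 0 rest.length (Nat.zero_le _)
      have hbs := bisectLeftB_spec rest (a + b) (List.pairwise_cons.mp hs1).2
      rw [insertIdx_eq_orderedInsert rest (a + b) _ hbsle hbs.1 hbs.2]
      -- apply IH
      have hlen' : (((l.erase a).erase b) ++ [a + b]).length = m := by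
        have e1 := List.length_erase_of_mem hmem1
        have e2 := List.length_erase_of_mem hmem2
        simp [e1, e2]
        omega
      have hpx : (List.orderedInsert (· ≤ ·) (a + b) rest).Perm (((l.erase a).erase b) ++ [a + b]) := by
        refine (List.perm_orderedInsert _ _ _).trans ?_
        exact (List.Perm.cons _ hp2).trans (List.perm_append_singleton _ _).symm
      have hsx : (List.orderedInsert (· ≤ ·) (a + b) rest).Pairwise (· ≤ ·) := by
        exact List.Pairwise.orderedInsert (a + b) rest (List.pairwise_cons.mp hs1).2
      exact ih m (by omega) _ _ _ hlen' hpx hsx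

-- ===== VERDICT (by name: the statement is the Claim_ definition above) =====
theorem solution_spec : Claim_equal_solution := by
  intro N cards _hd _hpre
  unfold Spec_solution solution solution_alt
  rw [PySem.List.length_sorted]
  exact loop_eq cards.length 0 cards (PySem.List.sorted cards (fun x => x) false) rfl
    (PySem.List.sorted_perm cards (fun x => x) false)
    (by simpa using PySem.List.sorted_pairwise cards (fun x => x))
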